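-- pv_equiv track=rewrite | github.com/onodwolff/Amadeus-2.0 | backend/gateway/app/nautilus_engine_service.py | _map_event_to_topic
-- ===== SOURCE A (Python) =====
-- from typing import IO, Any, AsyncIterator, Callable, Dict, Iterable, List, Optional, Tuple, Union
--
-- def _map_event_to_topic(event_name: str) -> Tuple[str, str]:
--     lowered = event_name.lower()
--     if "order" in lowered:
--         return "engine.orders", "order"
--     if any(keyword in lowered for keyword in ("fill", "execution", "trade")):
--         return "engine.executions", "execution"
--     if "position" in lowered or "portfolio" in lowered:
--         return "engine.portfolio", "position"
--     if any(keyword in lowered for keyword in ("risk", "margin", "limit")):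
--         return "engine.risk.alerts", "alert"
--     if any(
--         keyword in lowered for keyword in ("lifecycle", "status", "stop", "start")
--     ):
--         return "engine.nodes", "lifecycle"
--     return "engine.nautilus.events", "payload"
-- ===== SOURCE B (Python) =====
-- _KEYWORD_PRIORITY = {
--     "order": 0,
--     "fill": 1, "execution": 1, "trade": 1,
--     "position": 2, "portfolio": 2,
--     "risk": 3, "margin": 3, "limit": 3,
--     "lifecycle": 4, "status": 4, "stop": 4, "start": 4,
-- }
--
-- _RESULTS = [
--     ("engine.orders", "order"),
--     ("engine.executions", "execution"),
--     ("engine.portfolio", "position"),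
--     ("engine.risk.alerts", "alert"),
--     ("engine.nodes", "lifecycle"),
--     ("engine.nautilus.events", "payload"),
-- ]
--
-- def _map_event_to_topic(event_name: str):
--     lowered = event_name.lower()
--     best = min((p for k, p in _KEYWORD_PRIORITY.items() if k in lowered), default=5)
--     return _RESULTS[best]
-- ===== Notes on version B (the rewrite author's own statement) =====
-- stated objective: alternative
-- what changed: Replaces the sequential first-match keyword chain by a reduction: one flat keyword-to-priority map, a min over the priorities of all keywords contained in the lowered name (default 5), and an indexed lookup of the result table at that minimum.
import Mathlib
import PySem

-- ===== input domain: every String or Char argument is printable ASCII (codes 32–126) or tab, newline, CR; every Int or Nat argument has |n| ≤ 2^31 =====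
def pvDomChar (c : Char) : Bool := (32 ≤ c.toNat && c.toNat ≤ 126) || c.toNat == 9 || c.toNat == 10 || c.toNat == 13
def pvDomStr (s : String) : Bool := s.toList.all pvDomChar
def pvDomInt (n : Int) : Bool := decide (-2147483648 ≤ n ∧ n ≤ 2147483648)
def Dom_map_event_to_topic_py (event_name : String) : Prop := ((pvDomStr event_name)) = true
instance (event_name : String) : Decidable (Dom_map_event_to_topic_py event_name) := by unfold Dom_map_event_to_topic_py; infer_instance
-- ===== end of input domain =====

-- B replaces A's first-match if-chain by a min-priority reduction over one flat keyword map plus an indexed result table (alternative decomposition; same cost).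

-- ===== PORT A =====
def map_event_to_topic_py (event_name : String) : String × String :=
  let lowered := PySem.Str.lower event_name
  if PySem.Str.isIn "order" lowered then ("engine.orders", "order")
  else if ["fill", "execution", "trade"].any (fun k => PySem.Str.isIn k lowered) then
    ("engine.executions", "execution")
  else if PySem.Str.isIn "position" lowered || PySem.Str.isIn "portfolio" lowered then
    ("engine.portfolio", "position")
  else if ["risk", "margin", "limit"].any (fun k => PySem.Str.isIn k lowered) then
    ("engine.risk.alerts", "alert")
  else if ["lifecycle", "status", "stop", "start"].any (fun k => PySem.Str.isIn k lowered) then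
    ("engine.nodes", "lifecycle")
  else ("engine.nautilus.events", "payload")

-- ===== PORT B =====
def pvKeywordPriority : List (String × Nat) :=
  [ ("order", 0),
    ("fill", 1), ("execution", 1), ("trade", 1),
    ("position", 2), ("portfolio", 2),
    ("risk", 3), ("margin", 3), ("limit", 3),
    ("lifecycle", 4), ("status", 4), ("stop", 4), ("start", 4) ]

def pvResults : List (String × String) :=
  [ ("engine.orders", "order"),
    ("engine.executions", "execution"),
    ("engine.portfolio", "position"),
    ("engine.risk.alerts", "alert"),
    ("engine.nodes", "lifecycle"),
    ("engine.nautilus.events", "payload") ]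

-- min(generator of priorities of contained keywords, default=5), then index the result table
def map_event_to_topic_py_alt (event_name : String) : String × String :=
  let lowered := PySem.Str.lower event_name
  let best := (pvKeywordPriority.filter (fun kp => PySem.Str.isIn kp.1 lowered)).foldl
    (fun acc kp => min acc kp.2) 5
  pvResults.getD best ("engine.nautilus.events", "payload")

-- ===== PRECONDITION & SPEC =====
def Spec_map_event_to_topic_py (event_name : String) (out : String × String) : Prop := out = map_event_to_topic_py_alt event_name
instance (event_name : String) (out : String × String) : Decidable (Spec_map_event_to_topic_py event_name out) := by unfold Spec_map_event_to_topic_py; infer_instance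

-- ===== CLAIM =====
def Claim_equal_map_event_to_topic_py : Prop := ∀ (event_name : String), Dom_map_event_to_topic_py event_name → Spec_map_event_to_topic_py event_name (map_event_to_topic_py event_name)

-- ===== LEMMAS AND PROOFS =====

-- if every filtered-in element has priority ≥ acc, the min-fold stays at acc
theorem pv_fold_min_const (p : String × Nat → Bool) :
    ∀ (l : List (String × Nat)) (acc : Nat),
      (∀ kp ∈ l, p kp = true → acc ≤ kp.2) →
      (l.filter p).foldl (fun a kp => min a kp.2) acc = acc := by
  intro l
  induction l with
  | nil => intro acc _; rfl
  | cons y l' ih =>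
    intro acc h
    by_cases hy : p y = true
    · have h1 : acc ≤ y.2 := h y (List.mem_cons_self) hy
      simp only [List.filter_cons, hy, if_true, List.foldl_cons]
      have : min acc y.2 = acc := Nat.min_eq_left h1
      rw [this]
      exact ih acc (fun kp hm hp => h kp (List.mem_cons_of_mem _ hm) hp)
    · simp only [List.filter_cons, hy, Bool.false_eq_true, if_false]
      exact ih acc (fun kp hm hp => h kp (List.mem_cons_of_mem _ hm) hp)

-- the min-fold equals x.2 when x is a filtered-in element minimal among filtered-in elements and ≤ acc
theorem pv_fold_min_first (p : String × Nat → Bool) :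
    ∀ (l : List (String × Nat)) (acc : Nat) (x : String × Nat),
      x ∈ l → p x = true →
      (∀ kp ∈ l, p kp = true → x.2 ≤ kp.2) → x.2 ≤ acc →
      (l.filter p).foldl (fun a kp => min a kp.2) acc = x.2 := by
  intro l
  induction l with
  | nil => intro acc x hx; cases hx
  | cons y l' ih =>
    intro acc x hx hpx hmin hacc
    by_cases hy : p y = true
    · simp only [List.filter_cons, hy, if_true, List.foldl_cons]
      rcases List.mem_cons.mp hx with rfl | hx'
      · have : min acc x.2 = x.2 := Nat.min_eq_right hacc
        rw [this]
        exact pv_fold_min_const p l' x.2 (fun kp hm hp => hmin kp (List.mem_cons_of_mem _ hm) hp)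
      · have hxy : x.2 ≤ y.2 := hmin y (List.mem_cons_self) hy
        exact ih (min acc y.2) x hx' hpx
          (fun kp hm hp => hmin kp (List.mem_cons_of_mem _ hm) hp)
          (le_min hacc hxy)
    · simp only [List.filter_cons, hy, Bool.false_eq_true, if_false]
      rcases List.mem_cons.mp hx with rfl | hx'
      · exact absurd hpx hy
      · exact ih acc x hx' hpx (fun kp hm hp => hmin kp (List.mem_cons_of_mem _ hm) hp) hacc

-- specialization to B's concrete table
theorem pv_best_eq (lw : String) (x : String × Nat)
    (hmem : x ∈ pvKeywordPriority) (hx : PySem.Str.isIn x.1 lw = true)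
    (hmin : ∀ kp ∈ pvKeywordPriority, PySem.Str.isIn kp.1 lw = true → x.2 ≤ kp.2)
    (hle : x.2 ≤ 5) :
    (pvKeywordPriority.filter (fun kp => PySem.Str.isIn kp.1 lw)).foldl
      (fun acc kp => min acc kp.2) 5 = x.2 :=
  pv_fold_min_first (fun kp => PySem.Str.isIn kp.1 lw) pvKeywordPriority 5 x hmem hx hmin hle

-- ===== VERDICT =====
theorem map_event_to_topic_py_spec : Claim_equal_map_event_to_topic_py := by
  intro s _
  unfold Spec_map_event_to_topic_py map_event_to_topic_py map_event_to_topic_py_alt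
  simp only [List.any_cons, List.any_nil, Bool.or_false]
  set lw := PySem.Str.lower s with hlw
  by_cases h1 : PySem.Str.isIn "order" lw = true
  · rw [pv_best_eq lw ("order", 0) (by simp [pvKeywordPriority]) h1
      (fun kp _ _ => Nat.zero_le _) (by omega)]
    simp_all [pvResults]
  all_goals rw [Bool.not_eq_true] at h1
  by_cases h2 : PySem.Str.isIn "fill" lw = true
  · rw [pv_best_eq lw ("fill", 1) (by simp [pvKeywordPriority]) h2
      (by intro kp hm hp; simp [pvKeywordPriority] at hm
          rcases hm with rfl|rfl|rfl|rfl|rfl|rfl|rfl|rfl|rfl|rfl|rfl|rfl|rfl <;> simp_all) (by omega)]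
    simp_all [pvResults]
  all_goals rw [Bool.not_eq_true] at h2
  by_cases h3 : PySem.Str.isIn "execution" lw = true
  · rw [pv_best_eq lw ("execution", 1) (by simp [pvKeywordPriority]) h3
      (by intro kp hm hp; simp [pvKeywordPriority] at hm
          rcases hm with rfl|rfl|rfl|rfl|rfl|rfl|rfl|rfl|rfl|rfl|rfl|rfl|rfl <;> simp_all) (by omega)]
    simp_all [pvResults]
  all_goals rw [Bool.not_eq_true] at h3
  by_cases h4 : PySem.Str.isIn "trade" lw = true
  · rw [pv_best_eq lw ("trade", 1) (by simp [pvKeywordPriority]) h4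
      (by intro kp hm hp; simp [pvKeywordPriority] at hm
          rcases hm with rfl|rfl|rfl|rfl|rfl|rfl|rfl|rfl|rfl|rfl|rfl|rfl|rfl <;> simp_all) (by omega)]
    simp_all [pvResults]
  all_goals rw [Bool.not_eq_true] at h4
  by_cases h5 : PySem.Str.isIn "position" lw = true
  · rw [pv_best_eq lw ("position", 2) (by simp [pvKeywordPriority]) h5
      (by intro kp hm hp; simp [pvKeywordPriority] at hm
          rcases hm with rfl|rfl|rfl|rfl|rfl|rfl|rfl|rfl|rfl|rfl|rfl|rfl|rfl <;> simp_all) (by omega)]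
    simp_all [pvResults]
  all_goals rw [Bool.not_eq_true] at h5
  by_cases h6 : PySem.Str.isIn "portfolio" lw = true
  · rw [pv_best_eq lw ("portfolio", 2) (by simp [pvKeywordPriority]) h6
      (by intro kp hm hp; simp [pvKeywordPriority] at hm
          rcases hm with rfl|rfl|rfl|rfl|rfl|rfl|rfl|rfl|rfl|rfl|rfl|rfl|rfl <;> simp_all) (by omega)]
    simp_all [pvResults]
  all_goals rw [Bool.not_eq_true] at h6
  by_cases h7 : PySem.Str.isIn "risk" lw = true
  · rw [pv_best_eq lw ("risk", 3) (by simp [pvKeywordPriority]) h7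
      (by intro kp hm hp; simp [pvKeywordPriority] at hm
          rcases hm with rfl|rfl|rfl|rfl|rfl|rfl|rfl|rfl|rfl|rfl|rfl|rfl|rfl <;> simp_all) (by omega)]
    simp_all [pvResults]
  all_goals rw [Bool.not_eq_true] at h7
  by_cases h8 : PySem.Str.isIn "margin" lw = true
  · rw [pv_best_eq lw ("margin", 3) (by simp [pvKeywordPriority]) h8
      (by intro kp hm hp; simp [pvKeywordPriority] at hm
          rcases hm with rfl|rfl|rfl|rfl|rfl|rfl|rfl|rfl|rfl|rfl|rfl|rfl|rfl <;> simp_all) (by omega)]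
    simp_all [pvResults]
  all_goals rw [Bool.not_eq_true] at h8
  by_cases h9 : PySem.Str.isIn "limit" lw = true
  · rw [pv_best_eq lw ("limit", 3) (by simp [pvKeywordPriority]) h9
      (by intro kp hm hp; simp [pvKeywordPriority] at hm
          rcases hm with rfl|rfl|rfl|rfl|rfl|rfl|rfl|rfl|rfl|rfl|rfl|rfl|rfl <;> simp_all) (by omega)]
    simp_all [pvResults]
  all_goals rw [Bool.not_eq_true] at h9
  by_cases h10 : PySem.Str.isIn "lifecycle" lw = true
  · rw [pv_best_eq lw ("lifecycle", 4) (by simp [pvKeywordPriority]) h10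
      (by intro kp hm hp; simp [pvKeywordPriority] at hm
          rcases hm with rfl|rfl|rfl|rfl|rfl|rfl|rfl|rfl|rfl|rfl|rfl|rfl|rfl <;> simp_all) (by omega)]
    simp_all [pvResults]
  all_goals rw [Bool.not_eq_true] at h10
  by_cases h11 : PySem.Str.isIn "status" lw = true
  · rw [pv_best_eq lw ("status", 4) (by simp [pvKeywordPriority]) h11
      (by intro kp hm hp; simp [pvKeywordPriority] at hm
          rcases hm with rfl|rfl|rfl|rfl|rfl|rfl|rfl|rfl|rfl|rfl|rfl|rfl|rfl <;> simp_all) (by omega)]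
    simp_all [pvResults]
  all_goals rw [Bool.not_eq_true] at h11
  by_cases h12 : PySem.Str.isIn "stop" lw = true
  · rw [pv_best_eq lw ("stop", 4) (by simp [pvKeywordPriority]) h12
      (by intro kp hm hp; simp [pvKeywordPriority] at hm
          rcases hm with rfl|rfl|rfl|rfl|rfl|rfl|rfl|rfl|rfl|rfl|rfl|rfl|rfl <;> simp_all) (by omega)]
    simp_all [pvResults]
  all_goals rw [Bool.not_eq_true] at h12
  by_cases h13 : PySem.Str.isIn "start" lw = true
  · rw [pv_best_eq lw ("start", 4) (by simp [pvKeywordPriority]) h13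
      (by intro kp hm hp; simp [pvKeywordPriority] at hm
          rcases hm with rfl|rfl|rfl|rfl|rfl|rfl|rfl|rfl|rfl|rfl|rfl|rfl|rfl <;> simp_all) (by omega)]
    simp_all [pvResults]
  all_goals rw [Bool.not_eq_true] at h13
  rw [pv_fold_min_const (fun kp => PySem.Str.isIn kp.1 lw) pvKeywordPriority 5
    (by intro kp hm hp; simp [pvKeywordPriority] at hm
        rcases hm with rfl|rfl|rfl|rfl|rfl|rfl|rfl|rfl|rfl|rfl|rfl|rfl|rfl <;> simp_all)]
  simp_all [pvResults]
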